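-- pv_equiv track=rewrite | github.com/ChampCityChris/TazUO-Legion-Scripts | Scripts/Utilities/GumpMapper.py | _select_snapshot_by_state
-- ===== SOURCE A (Python) =====
-- def _safe_str(value):
--     """Return safe string."""
--     try:
--         return "" if value is None else str(value)
--     except Exception:
--         return ""
--
-- def _safe_int(value, default_value=0):
--     """Return safe integer."""
--     try:
--         return int(value)
--     except Exception:
--         return int(default_value)
--
-- def _select_snapshot_by_state(snapshots, expected_state_key):
--     """Pick snapshot matching expected state key, else first sorted."""
--     expected = _safe_str(expected_state_key)
--     if expected:
--         for snap in snapshots: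
--             if _safe_str(snap.get("state_key", "")) == expected:
--                 return snap
--     ordered = sorted(snapshots, key=lambda s: (_safe_str(s.get("state_key", "")), _safe_int(s.get("gump_id", 0), 0)))
--     return ordered[0] if ordered else None
-- ===== SOURCE B (Python) =====
-- def _safe_str(value):
--     """Return safe string."""
--     try:
--         return "" if value is None else str(value)
--     except Exception:
--         return ""
--
-- def _safe_int(value, default_value=0):
--     """Return safe integer."""
--     try:
--         return int(value)
--     except Exception:
--         return int(default_value)
--
-- def _select_snapshot_by_state(snapshots, expected_state_key):
--     """Pick snapshot matching expected state key, else smallest by (state_key, gump_id) in one pass."""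
--     expected = _safe_str(expected_state_key)
--     best = None  # (key, snap)
--     for snap in snapshots:
--         state = _safe_str(snap.get("state_key", ""))
--         if expected and state == expected:
--             return snap
--         key = (state, _safe_int(snap.get("gump_id", 0), 0))
--         if best is None or key < best[0]:
--             best = (key, snap)
--     return None if best is None else best[1]
-- ===== Notes on version B (the rewrite author's own statement) =====
-- stated objective: alternative
-- what changed: Replaced the match-loop followed by a full sort-and-take-head with a single pass that returns the first match immediately and otherwise tracks the running (state_key, gump_id)-minimum with strict < so the first of any tie wins.
import Mathlib
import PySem

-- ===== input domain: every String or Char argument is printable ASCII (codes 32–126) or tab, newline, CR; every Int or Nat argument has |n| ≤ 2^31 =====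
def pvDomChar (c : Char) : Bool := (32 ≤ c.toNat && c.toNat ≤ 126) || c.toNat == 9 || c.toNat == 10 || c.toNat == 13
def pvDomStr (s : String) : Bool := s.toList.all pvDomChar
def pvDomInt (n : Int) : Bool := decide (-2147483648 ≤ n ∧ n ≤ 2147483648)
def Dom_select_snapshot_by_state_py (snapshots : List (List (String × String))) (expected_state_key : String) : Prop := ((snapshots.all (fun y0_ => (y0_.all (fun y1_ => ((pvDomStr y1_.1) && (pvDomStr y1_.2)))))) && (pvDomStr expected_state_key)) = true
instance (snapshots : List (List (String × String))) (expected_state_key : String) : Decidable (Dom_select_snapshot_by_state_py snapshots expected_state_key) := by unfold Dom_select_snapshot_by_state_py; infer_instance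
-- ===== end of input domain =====

-- B replaces A's match-loop plus full sort-and-take-head by a single pass that returns the first
-- match immediately and otherwise tracks the running (state_key, gump_id)-minimum (alternative decomposition, same cost).


-- shared helpers: _safe_str(snap.get("state_key","")) and _safe_int(snap.get("gump_id",0),0)
def pvStateKey (snap : List (String × String)) : String :=
  ((PySem.Dict.mk snap).get? "state_key").getD ""

def pvGumpId (snap : List (String × String)) : Int :=
  match (PySem.Dict.mk snap).get? "gump_id" with
  | some s => (PySem.Int.ofStr? s).getD 0
  | none => 0

-- ===== PORT A =====
def select_snapshot_by_state_py (snapshots : List (List (String × String))) (expected_state_key : String) : Option (List (String × String)) :=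
  let expected := expected_state_key
  let matched : Option (List (String × String)) :=
    if expected ≠ "" then snapshots.find? (fun snap => pvStateKey snap == expected) else none
  match matched with
  | some snap => some snap
  | none =>
    let ordered := PySem.List.sorted2 snapshots pvStateKey pvGumpId
    match ordered with
    | [] => none
    | s :: _ => some s

-- ===== PORT B =====
-- Python tuple comparison (s1, i1) < (s2, i2)
def pvLexLt (a b : String × Int) : Bool :=
  decide (a.1 < b.1) || (a.1 == b.1 && decide (a.2 < b.2))

def pvLoop : List (List (String × String)) → String → Option ((String × Int) × List (String × String)) → Option (List (String × String))
  | [], _, best => best.map (·.2)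
  | snap :: rest, expected, best =>
    let state := pvStateKey snap
    if expected ≠ "" ∧ state = expected then some snap
    else
      let key := (state, pvGumpId snap)
      let best' := match best with
        | none => some (key, snap)
        | some b => if pvLexLt key b.1 then some (key, snap) else some b
      pvLoop rest expected best'

def select_snapshot_by_state_py_alt (snapshots : List (List (String × String))) (expected_state_key : String) : Option (List (String × String)) :=
  pvLoop snapshots expected_state_key none

-- ===== PRECONDITION & SPEC =====
def Spec_select_snapshot_by_state_py (snapshots : List (List (String × String))) (expected_state_key : String) (out : Option (List (String × String))) : Prop := out = select_snapshot_by_state_py_alt snapshots expected_state_key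
instance (snapshots : List (List (String × String))) (expected_state_key : String) (out : Option (List (String × String))) : Decidable (Spec_select_snapshot_by_state_py snapshots expected_state_key out) := by unfold Spec_select_snapshot_by_state_py; infer_instance

-- ===== CLAIM (what is proved, stated in full; the proofs are below) =====
def Claim_equal_select_snapshot_by_state_py : Prop := ∀ (snapshots : List (List (String × String))) (expected_state_key : String), Dom_select_snapshot_by_state_py snapshots expected_state_key → Spec_select_snapshot_by_state_py snapshots expected_state_key (select_snapshot_by_state_py snapshots expected_state_key)

-- ===== LEMMAS AND PROOFS =====

-- sorted2's strict comparison equals Python tuple '<' on the (state_key, gump_id) keys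
lemma pv_lt_eq (a b : List (String × String)) :
    (decide (pvStateKey a < pvStateKey b) || (!decide (pvStateKey b < pvStateKey a) && decide (pvGumpId a < pvGumpId b)))
      = pvLexLt (pvStateKey a, pvGumpId a) (pvStateKey b, pvGumpId b) := by
  unfold pvLexLt
  rcases lt_trichotomy (pvStateKey a) (pvStateKey b) with h | h | h
  · simp [h]
  · simp [h]
  · simp [h, not_lt_of_gt h, ne_of_gt h]

-- head of insertBy
lemma pv_head_insertBy (before : List (String × String) → List (String × String) → Bool)
    (x : List (String × String)) (ys : List (List (String × String))) :
    (PySem.List.insertBy before x ys).head? =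
      some (match ys with | [] => x | y :: _ => if before x y then x else y) := by
  cases ys with
  | nil => simp [PySem.List.insertBy]
  | cons y t =>
    by_cases h : before x y
    · simp [PySem.List.insertBy, h]
    · simp [PySem.List.insertBy, h]

-- one-pass minimum over Option (no keys stored)
def pvMinStep (h : Option (List (String × String))) (x : List (String × String)) : Option (List (String × String)) :=
  match h with
  | none => some x
  | some y => if pvLexLt (pvStateKey x, pvGumpId x) (pvStateKey y, pvGumpId y) then some x else some y

-- head of the insertion-sort foldl is the running strict-first minimum
lemma pv_head_foldl (before : List (String × String) → List (String × String) → Bool)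
    (xs : List (List (String × String))) (acc : List (List (String × String))) :
    (xs.foldl (fun acc x => PySem.List.insertBy before x acc) acc).head? =
      xs.foldl (fun h x => match h with | none => some x | some y => if before x y then some x else some y) acc.head? := by
  induction xs generalizing acc with
  | nil => rfl
  | cons x xs ih =>
    rw [List.foldl_cons, List.foldl_cons, ih, pv_head_insertBy]
    cases acc with
    | nil => rfl
    | cons y t => by_cases h : before x y <;> simp [h]

-- B's loop = first match (if expected nonempty), else the running minimum fold
lemma pv_loop_eq (expected : String) (xs : List (List (String × String)))
    (o : Option (List (String × String))) :
    pvLoop xs expected (o.map (fun s => ((pvStateKey s, pvGumpId s), s))) =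
      (match (if expected = "" then none else xs.find? (fun s => pvStateKey s == expected)) with
       | some snap => some snap
       | none => xs.foldl pvMinStep o) := by
  induction xs generalizing o with
  | nil => cases o <;> by_cases h : expected = "" <;> simp [pvLoop, h]
  | cons snap rest ih =>
    by_cases hg : expected ≠ "" ∧ pvStateKey snap = expected
    · simp [pvLoop, hg]
    · have hstep : (match o.map (fun s => ((pvStateKey s, pvGumpId s), s)) with
          | none => some ((pvStateKey snap, pvGumpId snap), snap)
          | some b => if pvLexLt (pvStateKey snap, pvGumpId snap) b.1 then some ((pvStateKey snap, pvGumpId snap), snap) else some b)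
          = (pvMinStep o snap).map (fun s => ((pvStateKey s, pvGumpId s), s)) := by
        cases o with
        | none => rfl
        | some y =>
          simp only [Option.map_some, pvMinStep]
          by_cases hl : pvLexLt (pvStateKey snap, pvGumpId snap) (pvStateKey y, pvGumpId y) <;> simp [hl]
      by_cases he : expected = ""
      · subst he
        simp only [pvLoop]
        rw [if_neg (by simp), hstep, ih (pvMinStep o snap)]
        simp
      · have hne : ¬ pvStateKey snap = expected := fun h => hg ⟨he, h⟩
        simp only [pvLoop]
        rw [if_neg hg, hstep, ih (pvMinStep o snap)]
        simp [he, hne]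

-- ===== VERDICT (by name: the statement is the Claim_ definition above) =====
theorem select_snapshot_by_state_py_spec : Claim_equal_select_snapshot_by_state_py := by
  intro snapshots expected _
  unfold Spec_select_snapshot_by_state_py select_snapshot_by_state_py select_snapshot_by_state_py_alt
  have hloop := pv_loop_eq expected snapshots none
  simp only [Option.map_none] at hloop
  rw [hloop]
  have hsorted : (PySem.List.sorted2 snapshots pvStateKey pvGumpId).head? =
      snapshots.foldl pvMinStep none := by
    simp only [PySem.List.sorted2, Bool.false_eq_true, if_false]
    rw [pv_head_foldl]
    refine PySem.List.foldl_congr_mem _ _ _ _ (fun h x _ => ?_)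
    cases h with
    | none => rfl
    | some y => simp only [pvMinStep, pv_lt_eq]
  by_cases he : expected = ""
  · simp only [he, ne_eq, not_true_eq_false, if_false, ite_true]
    simp [← hsorted]
    cases hc : PySem.List.sorted2 snapshots pvStateKey pvGumpId <;> simp
  · simp only [ne_eq, he, not_false_eq_true, if_true]
    cases hf : snapshots.find? (fun s => pvStateKey s == expected) with
    | some s => simp
    | none =>
      simp only [← hsorted]
      cases hc : PySem.List.sorted2 snapshots pvStateKey pvGumpId <;> simp
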